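-- pv_equiv track=rewrite | github.com/rmwkwok/crawler | post_process.py | find_repeated_fingerprints
-- ===== SOURCE A (Python) =====
-- def find_repeated_fingerprints(url_fingerprints):
--     sorted_fps = sorted(url_fingerprints.values())
--     repeated_fps = set()
--     for fp1, fp2 in zip(sorted_fps, sorted_fps[1:]):
--         if fp1 == fp2:
--             repeated_fps.add(fp1)
--
--     return {fp: set([url for url, _fp in url_fingerprints.items() if _fp == fp])
--                 for fp in repeated_fps}
-- ===== SOURCE B (Python) =====
-- def find_repeated_fingerprints(url_fingerprints):
--     groups = {}
--     for url, fp in url_fingerprints.items():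
--         groups.setdefault(fp, []).append(url)
--     return {fp: set(groups[fp]) for fp in sorted(groups) if len(groups[fp]) > 1}
-- ===== Notes on version B (the rewrite author's own statement) =====
-- stated objective: faster
-- what changed: Replaces A's sort-plus-adjacent-scan for repeats followed by a full rescan of the input per repeated fingerprint with a single grouping pass building fingerprint->urls, then keeping groups of size > 1.
import Mathlib
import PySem

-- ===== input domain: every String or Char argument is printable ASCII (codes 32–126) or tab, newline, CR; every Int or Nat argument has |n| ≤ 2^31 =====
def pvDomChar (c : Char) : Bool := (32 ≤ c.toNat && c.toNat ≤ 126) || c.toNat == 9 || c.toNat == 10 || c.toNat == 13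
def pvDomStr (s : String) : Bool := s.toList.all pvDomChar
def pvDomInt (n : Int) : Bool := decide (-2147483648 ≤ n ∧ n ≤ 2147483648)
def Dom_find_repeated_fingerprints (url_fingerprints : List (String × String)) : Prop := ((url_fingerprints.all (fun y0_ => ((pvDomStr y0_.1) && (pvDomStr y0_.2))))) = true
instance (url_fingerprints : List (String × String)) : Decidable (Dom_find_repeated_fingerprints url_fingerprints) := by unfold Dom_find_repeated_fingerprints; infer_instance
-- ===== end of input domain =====

-- B replaces A's sort + adjacent-duplicate scan + one full input rescan per repeated
-- fingerprint with a single grouping pass (fingerprint -> urls), keeping groups of size > 1.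


-- ===== PORT A =====
-- A: sorted_fps = sorted of the dict's values; adjacent-equal scan collects repeated
-- fingerprints into a set; then for each repeated fp a full rescan of the items builds its url set.
-- (The output dict is built by iterating the set `repeated_fps`: Python's hash order is not
-- modelled, we iterate in the set's insertion order; outputs are dicts, compared ignoring order.)
def find_repeated_fingerprints (url_fingerprints : List (String × String)) : List (String × List String) :=
  let sorted_fps := PySem.List.sorted (url_fingerprints.map (fun p => p.2)) (fun x => x)
  let repeated_fps : PySem.Set String :=
    (sorted_fps.zip (PySem.List.slice sorted_fps (some 1) none)).foldl
      (fun s p => if p.1 == p.2 then PySem.Set.add s p.1 else s) PySem.Set.empty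
  repeated_fps.map (fun fp =>
    (fp, PySem.Set.ofList ((url_fingerprints.filter (fun p => p.2 == fp)).map (fun p => p.1))))

-- ===== PORT B =====
-- B: one pass groups urls by fingerprint (groups.setdefault(fp, []).append(url), i.e. Dict.modify);
-- the result keeps, in sorted key order, the groups of size > 1.
-- (groups[fp] for fp a key of groups is ported as getD _ []: the key is always present.)
def find_repeated_fingerprints_alt (url_fingerprints : List (String × String)) : List (String × List String) :=
  let groups : PySem.Dict String (List String) :=
    url_fingerprints.foldl (fun d p => d.modify p.2 [] (fun v => v ++ [p.1])) PySem.Dict.empty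
  ((PySem.List.sorted groups.keys (fun x => x)).filter
      (fun fp => 1 < (groups.getD fp []).length)).map
    (fun fp => (fp, PySem.Set.ofList (groups.getD fp [])))

-- ===== PRECONDITION & SPEC =====
def Spec_find_repeated_fingerprints (url_fingerprints : List (String × String)) (out : List (String × List String)) : Prop := out = find_repeated_fingerprints_alt url_fingerprints
instance (url_fingerprints : List (String × String)) (out : List (String × List String)) : Decidable (Spec_find_repeated_fingerprints url_fingerprints out) := by unfold Spec_find_repeated_fingerprints; infer_instance

-- ===== CLAIM (what is proved, stated in full; the proofs are below) =====
def Claim_equal_find_repeated_fingerprints : Prop := ∀ (url_fingerprints : List (String × String)), Dom_find_repeated_fingerprints url_fingerprints → Spec_find_repeated_fingerprints url_fingerprints (find_repeated_fingerprints url_fingerprints)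

-- ===== LEMMAS AND PROOFS =====

-- the adjacent-duplicates list of s (what A's zip loop inspects)
def pvDups (s : List String) : List String :=
  ((s.zip (s.drop 1)).filter (fun p => p.1 == p.2)).map (fun p => p.1)

-- A's conditional-add loop is a Set.update with the filtered duplicate list
lemma pv_foldl_ite_add (l : List (String × String)) (s : PySem.Set String) :
    l.foldl (fun s p => if p.1 == p.2 then PySem.Set.add s p.1 else s) s
      = PySem.Set.update s ((l.filter (fun p => p.1 == p.2)).map (fun p => p.1)) := by
  induction l generalizing s with
  | nil => simp [PySem.Set.update_nil]
  | cons a t ih =>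
    rw [List.foldl_cons, List.filter_cons]
    by_cases h : a.1 == a.2
    · rw [if_pos h, if_pos h, List.map_cons, PySem.Set.update_cons]
      exact ih _
    · rw [if_neg h, if_neg h]
      exact ih _

lemma pvDups_sublist (s : List String) : (pvDups s).Sublist s := by
  unfold pvDups
  induction s with
  | nil => simp
  | cons a t ih =>
    cases t with
    | nil => simp
    | cons b t' =>
      simp only [List.drop_succ_cons, List.drop_zero, List.zip_cons_cons, List.filter_cons]
      by_cases h : a == b
      · simpa [h] using (ih.cons₂ a)
      · simpa [h] using (ih.cons a)

lemma pvDups_cons₂ (a b : String) (t : List String) :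
    pvDups (a :: b :: t) = (if a == b then [a] else []) ++ pvDups (b :: t) := by
  unfold pvDups
  by_cases h : a == b <;> simp [h]

lemma pv_mem_dups (s : List String) (hs : s.Pairwise (· ≤ ·)) (x : String) :
    x ∈ pvDups s ↔ 2 ≤ s.count x := by
  induction s with
  | nil => simp [pvDups]
  | cons a t ih =>
    cases t with
    | nil =>
      simp only [pvDups, List.drop_succ_cons, List.drop_nil, List.zip_nil_right,
        List.filter_nil, List.map_nil, List.not_mem_nil, List.count_cons, List.count_nil,
        false_iff]
      split <;> omega
    | cons b t' =>
      have hpt : (b :: t').Pairwise (fun x1 x2 => x1 ≤ x2) := hs.of_cons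
      have ih' := ih hpt
      have hcc : (a :: b :: t').count x = (b :: t').count x + (if a = x then 1 else 0) := by
        simp [List.count_cons]
      rw [pvDups_cons₂, List.mem_append, ih', hcc]
      by_cases hab : a = b
      · have hb : (a == b) = true := by simpa using hab
        simp only [hb, if_true, List.mem_singleton]
        by_cases hxa : x = a
        · subst hxa
          have hc : 1 ≤ (b :: t').count x :=
            List.count_pos_iff.mpr (by rw [hab]; exact List.mem_cons_self)
          rw [if_pos rfl]
          constructor
          · intro _; omega
          · intro _; left; rfl
        · have h0 : (if a = x then 1 else 0) = 0 := if_neg (Ne.symm hxa)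
          rw [h0]
          constructor
          · rintro (h | h)
            · exact absurd h hxa
            · omega
          · intro h; right; omega
      · have hb : (a == b) = false := by simpa using hab
        simp only [hb, Bool.false_eq_true, if_false, List.not_mem_nil, false_or]
        by_cases hxa : x = a
        · subst hxa
          have hnot : x ∉ b :: t' := by
            intro hm
            rcases List.mem_cons.mp hm with h1 | h1
            · exact hab h1
            · have h2 : x ≤ b := (List.pairwise_cons.mp hs).1 b (by simp)
              have h3 : b ≤ x := (List.pairwise_cons.mp hpt).1 x h1
              exact hab (le_antisymm h2 h3)
          have hc0 : (b :: t').count x = 0 := List.count_eq_zero.mpr hnot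
          rw [hc0, if_pos rfl]
          omega
        · have h0 : (if a = x then 1 else 0) = 0 := if_neg (Ne.symm hxa)
          rw [h0]
          omega

lemma pv_ofList_sublist (xs : List String) : (PySem.Set.ofList xs).Sublist xs := by
  induction xs with
  | nil => simp [PySem.Set.ofList_nil]
  | cons a t ih =>
    rw [PySem.Set.ofList_cons]
    have h1 : (PySem.Set.discard (PySem.Set.ofList t) a).Sublist (PySem.Set.ofList t) :=
      List.filter_sublist
    exact (h1.trans ih).cons₂ a

-- B's grouping fold: keys are the distinct fingerprints in first-occurrence order
lemma pv_keys_groups (l : List (String × String)) (d : PySem.Dict String (List String)) :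
    (l.foldl (fun d p => d.modify p.2 [] (fun v => v ++ [p.1])) d).keys
      = PySem.Set.update d.keys (l.map (fun p => p.2)) := by
  induction l generalizing d with
  | nil => simp [PySem.Set.update_nil]
  | cons a t ih =>
    rw [List.foldl_cons, ih, List.map_cons, PySem.Set.update_cons]
    congr 1
    rw [PySem.Dict.keys_modify]
    by_cases h : d.contains a.2 = true
    · rw [PySem.Dict.keys_insert_of_contains _ _ h,
        PySem.Set.add_of_mem ((PySem.Dict.contains_iff_mem_keys d a.2).mp h)]
    · rw [PySem.Dict.keys_insert_of_not_contains _ _ (Bool.not_eq_true _ ▸ h),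
        PySem.Set.add_of_not_mem (fun hm => h ((PySem.Dict.contains_iff_mem_keys d a.2).mpr hm))]

-- B's grouping fold: the group of fp is exactly the urls whose fingerprint is fp, in input order
lemma pv_getD_groups (l : List (String × String)) (fp : String) :
    (l.foldl (fun d p => d.modify p.2 [] (fun v => v ++ [p.1])) PySem.Dict.empty).getD fp []
      = (l.filter (fun p => p.2 == fp)).map (fun p => p.1) := by
  have hswap : l.foldl (fun d p => d.modify p.2 [] (fun v => v ++ [p.1])) PySem.Dict.empty
      = (l.map (fun p => (p.2, p.1))).foldl
          (fun d p => d.modify p.1 [] (fun v => v ++ [p.2])) PySem.Dict.empty := by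
    rw [List.foldl_map]
  rw [hswap, PySem.Dict.getD_foldl_modify_append, List.filter_map, List.map_map]
  simp [Function.comp_def]

-- ===== VERDICT (by name: the statement is the Claim_ definition above) =====
theorem find_repeated_fingerprints_spec : Claim_equal_find_repeated_fingerprints := by
  intro l _
  unfold Spec_find_repeated_fingerprints find_repeated_fingerprints find_repeated_fingerprints_alt
  simp only []
  rw [PySem.List.slice_from _ (by norm_num), show ((1 : Int).toNat) = 1 from rfl,
    pv_foldl_ite_add]
  set fps := l.map (fun p => p.2) with hfps
  set sfps := PySem.List.sorted fps (fun x => x) with hsfps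
  set groups := l.foldl (fun d p => d.modify p.2 [] (fun v => v ++ [p.1])) PySem.Dict.empty
    with hgroups
  have hAkeys : PySem.Set.update PySem.Set.empty
        (((sfps.zip (List.drop 1 sfps)).filter (fun p => p.1 == p.2)).map (fun p => p.1))
      = PySem.Set.ofList (pvDups sfps) := PySem.Set.update_nil_left _
  rw [hAkeys]
  have hkeys : groups.keys = PySem.Set.ofList fps := by
    rw [hgroups, pv_keys_groups, PySem.Dict.keys_empty, PySem.Set.update_nil_left, hfps]
  rw [hkeys]
  have hgetD : ∀ fp, groups.getD fp [] = (l.filter (fun p => p.2 == fp)).map (fun p => p.1) :=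
    fun fp => by rw [hgroups]; exact pv_getD_groups l fp
  have hcount : ∀ fp, (groups.getD fp []).length = fps.count fp := by
    intro fp
    rw [hgetD, List.length_map, hfps, List.count_eq_countP, List.countP_map,
      ← List.countP_eq_length_filter]
    congr 1
  have hR : PySem.Set.ofList (pvDups sfps)
      = (PySem.List.sorted (PySem.Set.ofList fps) (fun x => x)).filter
          (fun fp => decide (1 < (groups.getD fp []).length)) := by
    have hsorted_pair : sfps.Pairwise (· ≤ ·) := PySem.List.sorted_pairwise fps (fun x => x)
    have hdups_pair : (pvDups sfps).Pairwise (· ≤ ·) :=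
      hsorted_pair.sublist (pvDups_sublist sfps)
    have hA_pair : (PySem.Set.ofList (pvDups sfps)).Pairwise (· ≤ ·) :=
      hdups_pair.sublist (pv_ofList_sublist _)
    have hA_nodup : (PySem.Set.ofList (pvDups sfps)).Nodup := PySem.Set.nodup_ofList _
    have hB_pair0 : (PySem.List.sorted (PySem.Set.ofList fps) (fun x => x)).Pairwise (· ≤ ·) :=
      PySem.List.sorted_pairwise _ _
    have hB_pair := hB_pair0.filter (fun fp => decide (1 < (groups.getD fp []).length))
    have hB_nodup0 : (PySem.List.sorted (PySem.Set.ofList fps) (fun x => x)).Nodup :=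
      ((PySem.List.sorted_perm _ _ _).nodup_iff).mpr (PySem.Set.nodup_ofList _)
    have hB_nodup := hB_nodup0.filter (fun fp => decide (1 < (groups.getD fp []).length))
    have hmemA : ∀ x, x ∈ PySem.Set.ofList (pvDups sfps) ↔ 2 ≤ fps.count x := by
      intro x
      rw [PySem.Set.mem_ofList, pv_mem_dups sfps hsorted_pair x, hsfps,
        (PySem.List.sorted_perm fps (fun x => x) false).count_eq]
    have hmemB : ∀ x, (x ∈ (PySem.List.sorted (PySem.Set.ofList fps) (fun x => x)).filter
          (fun fp => decide (1 < (groups.getD fp []).length))) ↔ 2 ≤ fps.count x := by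
      intro x
      rw [List.mem_filter]
      constructor
      · rintro ⟨_, h2⟩
        have := hcount x
        simp only [decide_eq_true_eq] at h2
        omega
      · intro h2
        refine ⟨?_, by simp only [decide_eq_true_eq, hcount x]; omega⟩
        rw [PySem.List.mem_sorted, PySem.Set.mem_ofList]
        exact List.count_pos_iff.mp (by omega)
    have hperm : (PySem.Set.ofList (pvDups sfps)).Perm
        ((PySem.List.sorted (PySem.Set.ofList fps) (fun x => x)).filter
          (fun fp => decide (1 < (groups.getD fp []).length))) :=
      (List.perm_ext_iff_of_nodup hA_nodup hB_nodup).mpr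
        (fun x => (hmemA x).trans (hmemB x).symm)
    exact List.Perm.eq_of_pairwise
      (fun a b _ _ h1 h2 => le_antisymm h1 h2) hA_pair hB_pair hperm
  rw [hR]
  refine List.map_congr_left (fun fp hfp => ?_)
  rw [hgetD]
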